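-- pv_equiv track=rewrite | github.com/zitoure/content-understanting-demo | utils/golf_models.py | extract_enum_value
-- ===== SOURCE A (Python) =====
-- from typing import Optional, Dict, List, Any
--
-- def extract_enum_value(answer: str, enum_values: List[str]) -> Optional[str]:
--     """Extract enum value from answer text."""
--     answer_lower = answer.lower()
--
--     # Exact match first
--     for enum_value in enum_values:
--         if enum_value.lower() in answer_lower:
--             return enum_value
--
--     # Partial matching
--     for enum_value in enum_values:
--         enum_words = enum_value.lower().split()
--         if any(word in answer_lower for word in enum_words):
--             return enum_value
--
--     return None
-- ===== SOURCE B (Python) =====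
-- from typing import Optional, List
--
--
-- def extract_enum_value(answer: str, enum_values: List[str]) -> Optional[str]:
--     """Extract enum value from answer text (single pass with a first-partial-match fallback)."""
--     answer_lower = answer.lower()
--     fallback = None
--     for enum_value in enum_values:
--         ev_lower = enum_value.lower()
--         if ev_lower in answer_lower:
--             return enum_value
--         if fallback is None and any(word in answer_lower for word in ev_lower.split()):
--             fallback = enum_value
--     return fallback
-- ===== Notes on version B (the rewrite author's own statement) =====
-- stated objective: alternative
-- what changed: A's two sequential passes (exact-substring scan, then word-match scan) are merged into one pass that returns on an exact match and records the first partial match in a fallback variable returned after the loop.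
import Mathlib
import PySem

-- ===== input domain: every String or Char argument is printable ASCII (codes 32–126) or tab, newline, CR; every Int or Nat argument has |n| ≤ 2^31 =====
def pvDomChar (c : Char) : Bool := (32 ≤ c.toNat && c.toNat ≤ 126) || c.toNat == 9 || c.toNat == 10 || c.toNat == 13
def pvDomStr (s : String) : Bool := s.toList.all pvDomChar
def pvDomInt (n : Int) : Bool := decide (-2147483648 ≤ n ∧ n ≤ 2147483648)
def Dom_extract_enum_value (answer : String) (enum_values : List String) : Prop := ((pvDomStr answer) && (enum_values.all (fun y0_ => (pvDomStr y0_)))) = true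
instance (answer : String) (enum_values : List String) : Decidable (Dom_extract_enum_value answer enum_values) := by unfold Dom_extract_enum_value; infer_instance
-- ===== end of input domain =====

-- B replaces A's two sequential passes by one pass that records the first partial match as a fallback (alternative decomposition, same cost).


-- ===== PORT A =====
-- first loop of A: return the first enum_value whose lowercase form is a substring of answer_lower
def pvALoop1 (answer_lower : String) : List String → Option String
  | [] => none
  | ev :: rest =>
    if PySem.Str.isIn (PySem.Str.lower ev) answer_lower then some ev
    else pvALoop1 answer_lower rest

-- second loop of A: return the first enum_value one of whose lowercase words occurs in answer_lower
def pvALoop2 (answer_lower : String) : List String → Option String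
  | [] => none
  | ev :: rest =>
    if (PySem.Str.split₀ (PySem.Str.lower ev)).any (fun w => PySem.Str.isIn w answer_lower) then some ev
    else pvALoop2 answer_lower rest

def extract_enum_value (answer : String) (enum_values : List String) : Option String :=
  let answer_lower := PySem.Str.lower answer
  match pvALoop1 answer_lower enum_values with
  | some v => some v
  | none => pvALoop2 answer_lower enum_values

-- ===== PORT B =====
-- single pass: exact substring match returns immediately; the first partial (word) match is kept as fallback
def pvBLoop (answer_lower : String) (fallback : Option String) : List String → Option String
  | [] => fallback
  | ev :: rest =>
    let ev_lower := PySem.Str.lower ev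
    if PySem.Str.isIn ev_lower answer_lower then some ev
    else
      pvBLoop answer_lower
        (if fallback.isNone && (PySem.Str.split₀ ev_lower).any (fun w => PySem.Str.isIn w answer_lower)
         then some ev else fallback)
        rest

def extract_enum_value_alt (answer : String) (enum_values : List String) : Option String :=
  pvBLoop (PySem.Str.lower answer) none enum_values

-- ===== PRECONDITION & SPEC =====
def Spec_extract_enum_value (answer : String) (enum_values : List String) (out : Option String) : Prop := out = extract_enum_value_alt answer enum_values
instance (answer : String) (enum_values : List String) (out : Option String) : Decidable (Spec_extract_enum_value answer enum_values out) := by unfold Spec_extract_enum_value; infer_instance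

-- ===== CLAIM (what is proved, stated in full; the proofs are below) =====
def Claim_equal_extract_enum_value : Prop := ∀ (answer : String) (enum_values : List String), Dom_extract_enum_value answer enum_values → Spec_extract_enum_value answer enum_values (extract_enum_value answer enum_values)

-- ===== LEMMAS AND PROOFS =====
-- B's accumulator loop, characterised by A's two loops: an exact match anywhere wins;
-- otherwise an already-recorded fallback wins over later partial matches.
theorem pvBLoop_eq (al : String) (fb : Option String) (evs : List String) :
    pvBLoop al fb evs =
      match pvALoop1 al evs with
      | some v => some v
      | none => match fb with
                | some f => some f
                | none => pvALoop2 al evs := by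
  induction evs generalizing fb with
  | nil => cases fb <;> rfl
  | cons ev rest ih =>
    simp only [pvBLoop, pvALoop1, pvALoop2]
    by_cases hx : PySem.Str.isIn (PySem.Str.lower ev) al = true
    · rw [if_pos hx, if_pos hx]
    · rw [if_neg hx, if_neg hx, ih]
      cases fb with
      | some f => rfl
      | none =>
        simp only [Option.isNone_none, Bool.true_and]
        by_cases hp : ((PySem.Str.split₀ (PySem.Str.lower ev)).any fun w => PySem.Str.isIn w al) = true
        · rw [if_pos hp, if_pos hp]
        · rw [if_neg hp, if_neg hp]

-- ===== VERDICT (by name: the statement is the Claim_ definition above) =====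
theorem extract_enum_value_spec : Claim_equal_extract_enum_value := by
  intro answer enum_values _
  unfold Spec_extract_enum_value extract_enum_value extract_enum_value_alt
  rw [pvBLoop_eq]
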